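-- pv_equiv track=rewrite | github.com/HansongProgramming/Automations | Assessment Report Generator/app/analyzer/credit_analyzer.py | check_repeat_lending
-- ===== SOURCE A (Python) =====
-- from typing import Dict, List, Any
--
-- def check_repeat_lending(accounts: List[Dict]) -> tuple[bool, int]:
--     """Check for repeat lending with same providers. Returns (flagged, points)"""
--     providers = {}
--
--     for account in accounts:
--         lender = account.get('Lender', 'Unknown')
--         account_num = account.get('Account Number', 'Unknown')
--
--         if lender not in providers:
--             providers[lender] = []
--         providers[lender].append(account_num)
--
--     repeat_providers = []
--     for provider, account_list in providers.items():
--         if len(account_list) >= 2: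
--             repeat_providers.append(provider)
--
--     result = len(repeat_providers) > 0
--     points = 25 if result else 0
--     return result, points
-- ===== SOURCE B (Python) =====
-- def check_repeat_lending(accounts):
--     """Check for repeat lending with same providers. Returns (flagged, points)"""
--     seen = set()
--     for account in accounts:
--         lender = account.get('Lender', 'Unknown')
--         if lender in seen:
--             return True, 25
--         seen.add(lender)
--     return False, 0
-- ===== Notes on version B (the rewrite author's own statement) =====
-- stated objective: simpler
-- what changed: Replaces the build-a-dict-of-account-lists-then-rescan-for-length>=2 structure with a single short-circuiting pass over a seen set that returns (True, 25) at the first repeated lender.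
import Mathlib
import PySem

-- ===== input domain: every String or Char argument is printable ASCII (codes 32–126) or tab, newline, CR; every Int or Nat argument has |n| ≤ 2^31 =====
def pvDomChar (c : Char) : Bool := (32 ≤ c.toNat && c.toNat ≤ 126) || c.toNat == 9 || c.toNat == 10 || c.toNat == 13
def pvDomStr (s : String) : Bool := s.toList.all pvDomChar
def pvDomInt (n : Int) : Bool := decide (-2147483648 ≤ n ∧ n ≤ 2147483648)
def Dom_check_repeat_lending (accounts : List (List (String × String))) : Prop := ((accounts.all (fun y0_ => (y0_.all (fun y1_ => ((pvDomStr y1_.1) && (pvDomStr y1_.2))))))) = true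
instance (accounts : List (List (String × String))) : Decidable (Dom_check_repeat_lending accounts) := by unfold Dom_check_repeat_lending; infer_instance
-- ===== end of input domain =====

-- B replaces A's dict-of-account-lists plus second scan with a single short-circuiting
-- pass over a `seen` set (objective: simpler).

-- ===== PORT A =====
def check_repeat_lending (accounts : List (List (String × String))) : Bool × Int :=
  let providers : PySem.Dict String (List String) :=
    accounts.foldl (fun providers account =>
      let lender := (PySem.Dict.mk account).getD "Lender" "Unknown"
      let account_num := (PySem.Dict.mk account).getD "Account Number" "Unknown"
      let providers := if providers.contains lender then providers else providers.insert lender []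
      providers.modify lender [] (· ++ [account_num])) PySem.Dict.empty
  let repeat_providers : List String :=
    providers.items.foldl (fun repeat_providers pa =>
      if pa.2.length ≥ 2 then repeat_providers ++ [pa.1] else repeat_providers) []
  let result : Bool := decide (repeat_providers.length > 0)
  let points : Int := if result then 25 else 0
  (result, points)

-- ===== PORT B =====
def check_repeat_lending_altGo (accounts : List (List (String × String))) (seen : PySem.Set String) : Bool × Int :=
  match accounts with
  | [] => (false, 0)
  | account :: rest =>
    let lender := (PySem.Dict.mk account).getD "Lender" "Unknown"
    if PySem.Set.contains seen lender then (true, 25)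
    else check_repeat_lending_altGo rest (PySem.Set.add seen lender)

def check_repeat_lending_alt (accounts : List (List (String × String))) : Bool × Int :=
  check_repeat_lending_altGo accounts PySem.Set.empty

-- ===== PRECONDITION & SPEC =====
def Spec_check_repeat_lending (accounts : List (List (String × String))) (out : Bool × Int) : Prop := out = check_repeat_lending_alt accounts
instance (accounts : List (List (String × String))) (out : Bool × Int) : Decidable (Spec_check_repeat_lending accounts out) := by unfold Spec_check_repeat_lending; infer_instance

-- ===== CLAIM (what is proved, stated in full; the proofs are below) =====
def Claim_equal_check_repeat_lending : Prop := ∀ (accounts : List (List (String × String))), Dom_check_repeat_lending accounts → Spec_check_repeat_lending accounts (check_repeat_lending accounts)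

-- ===== LEMMAS AND PROOFS =====

-- the lender / account number a given account contributes
def pvLender (account : List (String × String)) : String :=
  (PySem.Dict.mk account).getD "Lender" "Unknown"

def pvAnum (account : List (String × String)) : String :=
  (PySem.Dict.mk account).getD "Account Number" "Unknown"

-- common reference value: flag iff some lender occurs twice
def pvRef (accounts : List (List (String × String))) : Bool × Int :=
  if (accounts.map pvLender).Nodup then (false, 0) else (true, 25)

theorem altGo_eq (accounts : List (List (String × String))) (seen : PySem.Set String)
    (hnd : seen.Nodup) :
    check_repeat_lending_altGo accounts seen =
      if (seen ++ accounts.map pvLender).Nodup then (false, 0) else (true, 25) := by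
  induction accounts generalizing seen with
  | nil => simp [check_repeat_lending_altGo, hnd]
  | cons a rest ih =>
    have e : (PySem.Dict.mk a).getD "Lender" "Unknown" = pvLender a := rfl
    simp only [check_repeat_lending_altGo, e, List.map_cons]
    by_cases hmem : pvLender a ∈ seen
    · have hdup : ¬ (seen ++ pvLender a :: rest.map pvLender).Nodup := by
        intro h
        exact (List.disjoint_of_nodup_append h) hmem (by simp)
      simp [hmem, hdup]
    · have eadd : PySem.Set.add seen (pvLender a) = seen ++ [pvLender a] :=
        PySem.Set.add_of_not_mem hmem
      have hnd' : (seen ++ [pvLender a]).Nodup := by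
        have hdisj : List.Disjoint seen [pvLender a] := by
          intro x hx hx'
          rw [List.mem_singleton] at hx'
          exact hmem (hx' ▸ hx)
        exact List.Nodup.append hnd (List.nodup_singleton _) hdisj
      have hrec := ih (seen ++ [pvLender a]) hnd'
      rw [eadd, hrec, List.append_assoc]
      simp [hmem]

theorem alt_eq_ref (accounts : List (List (String × String))) :
    check_repeat_lending_alt accounts = pvRef accounts := by
  have := altGo_eq accounts PySem.Set.empty List.nodup_nil
  simpa [check_repeat_lending_alt, pvRef, PySem.Set.empty] using this

-- A's loop body collapses to a single modify
theorem step_eq (d : PySem.Dict String (List String)) (k : String) (v : String) :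
    (if d.contains k then d else d.insert k []).modify k [] (· ++ [v]) =
      d.modify k [] (· ++ [v]) := by
  by_cases h : d.contains k = true
  · simp [h]
  · simp only [Bool.not_eq_true] at h
    have h0 : d.get? k = none := by
      rw [PySem.Dict.get?_eq_none_iff_contains, h]
    have hf : List.find? (fun p => p.1 == k) d.items = none := by
      simpa [PySem.Dict.get?, Option.map_eq_none_iff] using h0
    have hmap : List.map (fun p => if p.1 = k then (k, [v]) else p) d.items = d.items := by
      have h1 := List.find?_eq_none.mp hf
      calc List.map (fun p => if p.1 = k then (k, [v]) else p) d.items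
          = d.items.map id := List.map_congr_left (fun p hp => by
              have := h1 p hp; simp at this; simp [this])
        _ = d.items := List.map_id _
    simp [PySem.Dict.modify, PySem.Dict.getD, PySem.Dict.insert, PySem.Dict.get?, hf, h, hmap]

-- the second loop collects the keys of the long lists
theorem collect_eq (l : List (String × List String)) (acc : List String) :
    l.foldl (fun acc pa => if pa.2.length ≥ 2 then acc ++ [pa.1] else acc) acc
      = acc ++ (l.filter (fun pa => pa.2.length ≥ 2)).map (·.1) := by
  induction l generalizing acc with
  | nil => simp
  | cons p rest ih =>
    by_cases hp : p.2.length ≥ 2 <;> simp [hp, ih, List.append_assoc]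

-- get? at a member of items, when the keys are Nodup
theorem get?_of_mem_items {ν : Type} (items : List (String × ν)) (k : String) (v : ν)
    (hnd : (items.map (·.1)).Nodup) (hmem : (k, v) ∈ items) :
    (PySem.Dict.mk items).get? k = some v := by
  induction items with
  | nil => simp at hmem
  | cons p rest ih =>
    simp only [List.map_cons, List.nodup_cons] at hnd
    obtain ⟨hp1, hrest⟩ := hnd
    rw [PySem.Dict.get?_mk_cons]
    rcases List.mem_cons.mp hmem with h | h
    · rw [← h]; simp
    · have hne : (p.1 == k) = false := by
        apply beq_eq_false_iff_ne.mpr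
        intro hkk
        exact hp1 (hkk ▸ List.mem_map_of_mem (f := (·.1)) h)
      rw [hne]
      simp only [Bool.false_eq_true, if_false]
      exact ih hrest h

theorem a_eq_ref (accounts : List (List (String × String))) :
    check_repeat_lending accounts = pvRef accounts := by
  have hfun : (fun (providers : PySem.Dict String (List String)) account =>
      let lender := (PySem.Dict.mk account).getD "Lender" "Unknown"
      let account_num := (PySem.Dict.mk account).getD "Account Number" "Unknown"
      let providers := if providers.contains lender then providers else providers.insert lender []
      providers.modify lender [] (· ++ [account_num]))
      = (fun (d : PySem.Dict String (List String)) a =>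
          d.modify (pvLender a) [] (· ++ [pvAnum a])) := by
    funext d a
    exact step_eq d (pvLender a) (pvAnum a)
  have hfold :
      accounts.foldl (fun providers account =>
        let lender := (PySem.Dict.mk account).getD "Lender" "Unknown"
        let account_num := (PySem.Dict.mk account).getD "Account Number" "Unknown"
        let providers := if providers.contains lender then providers else providers.insert lender []
        providers.modify lender [] (· ++ [account_num])) PySem.Dict.empty
      = (accounts.map (fun a => (pvLender a, pvAnum a))).foldl
          (fun d p => d.modify p.1 [] (· ++ [p.2])) PySem.Dict.empty := by
    rw [hfun, List.foldl_map]
  set pairs := accounts.map (fun a => (pvLender a, pvAnum a)) with hpairs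
  set D := pairs.foldl (fun d p => d.modify p.1 [] (· ++ [p.2])) PySem.Dict.empty with hD
  have hfst : pairs.map (·.1) = accounts.map pvLender := by
    simp [hpairs, List.map_map, Function.comp]
  have hgetD : ∀ c, (D.getD c []).length = (accounts.map pvLender).count c := by
    intro c
    rw [hD, PySem.Dict.getD_foldl_modify_append]
    simp only [PySem.Dict.getD, PySem.Dict.empty, PySem.Dict.get?]
    rw [← hfst, List.count_eq_countP, List.countP_map, List.countP_eq_length_filter]
    simp [Function.comp_def]
  have hkeys : D.keys = PySem.Set.ofList (accounts.map pvLender) := by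
    rw [hD, ← hfst]
    rw [PySem.Dict.keys_foldl_modify_key (l := pairs) (key := (·.1)) (d0 := ([] : List String))
      (f := fun (_ : PySem.Dict String (List String)) (p : String × String) => (· ++ [p.2]))
      (d := PySem.Dict.empty)]
    simp [PySem.Dict.empty, PySem.Dict.keys, PySem.Set.update_nil_left]
  have hknd : D.keys.Nodup := by rw [hkeys]; exact PySem.Set.nodup_ofList _
  have hval : ∀ pa ∈ D.items, D.getD pa.1 [] = pa.2 := by
    rintro ⟨k, v⟩ hmem
    have hget : (PySem.Dict.mk D.items).get? k = some v :=
      get?_of_mem_items D.items k v hknd hmem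
    simp only [PySem.Dict.getD]
    rw [show D.get? k = some v from hget]
    rfl
  have hiff : (∃ pa ∈ D.items, pa.2.length ≥ 2) ↔ ¬ (accounts.map pvLender).Nodup := by
    rw [List.nodup_iff_count_le_one]
    push_neg
    constructor
    · rintro ⟨⟨k, v⟩, hmem, hlen⟩
      refine ⟨k, ?_⟩
      have hv := hval (k, v) hmem
      have hc := hgetD k
      rw [hv] at hc
      omega
    · rintro ⟨k, hk⟩
      have hkmem : k ∈ D.keys := by
        rw [hkeys, PySem.Set.mem_ofList]
        exact List.count_pos_iff.mp (by omega)
      obtain ⟨v, hpa⟩ : ∃ x, (k, x) ∈ D.items := by simpa [PySem.Dict.keys] using hkmem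
      refine ⟨(k, v), hpa, ?_⟩
      have hv := hval (k, v) hpa
      have hc := hgetD k
      rw [show D.getD k [] = v from hv] at hc
      simpa [hc] using hk
  have hres : (0 < ((D.items.filter (fun pa => pa.2.length ≥ 2)).map (·.1)).length)
      ↔ ¬ (accounts.map pvLender).Nodup := by
    rw [← hiff, List.length_map, List.length_pos_iff, Ne, List.filter_eq_nil_iff]
    push_neg
    simp
  unfold check_repeat_lending
  simp only [hfold]
  rw [collect_eq]
  by_cases hn : (accounts.map pvLender).Nodup
  · have h2 : ¬ (0 < ((D.items.filter (fun pa => pa.2.length ≥ 2)).map (·.1)).length) :=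
      fun hp => (hres.mp hp) hn
    simp only [List.nil_append, gt_iff_lt]
    rw [decide_eq_false h2]
    simp [pvRef, hn]
  · have h2 := hres.mpr hn
    simp only [List.nil_append, gt_iff_lt]
    rw [decide_eq_true h2]
    simp [pvRef, hn]

-- ===== VERDICT (by name: the statement is the Claim_ definition above) =====
theorem check_repeat_lending_spec : Claim_equal_check_repeat_lending := by
  intro accounts _
  unfold Spec_check_repeat_lending
  rw [a_eq_ref, alt_eq_ref]
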